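-- pv_equiv track=rewrite | github.com/robocasa/robocasa | docs/conf.py | _rc_anchor_id_from_activity_title
-- ===== SOURCE A (Python) =====
-- def _rc_anchor_id_from_activity_title(title: str) -> str:
--     # Match the JS slugging logic in composite_tasks_dropdown.js (roughly Sphinx defaults)
--     s = (title or "").lower().replace("&", " and ")
--     out = []
--     for ch in s:
--         if ch.isalnum() or ch in [" ", "-"]:
--             out.append(ch)
--     s = "".join(out).strip()
--     s = "-".join([p for p in s.split() if p])
--     while "--" in s:
--         s = s.replace("--", "-")
--     return s
-- ===== SOURCE B (Python) =====
-- def _rc_anchor_id_from_activity_title(title: str) -> str: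
--     # One pass with a separator flag instead of split/join plus the repeated
--     # "--"-replacement loop: every maximal run of spaces/dashes (after trimming
--     # outer whitespace) becomes a single dash.
--     s = (title or "").lower().replace("&", " and ")
--     kept = "".join(ch for ch in s if ch.isalnum() or ch in " -")
--     kept = kept.strip()
--     out = []
--     in_sep = False
--     for ch in kept:
--         if ch == " " or ch == "-":
--             if not in_sep:
--                 out.append("-")
--             in_sep = True
--         else:
--             out.append(ch)
--             in_sep = False
--     return "".join(out)
-- ===== Notes on version B (the rewrite author's own statement) =====
-- stated objective: simpler
-- what changed: Replaces A's whitespace split()/dash join plus its fixed-point loop that repeatedly rescans the string replacing double dashes by a single left-to-right pass with an in-separator flag that collapses each maximal run of spaces and dashes (after strip) to one dash.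
import Mathlib
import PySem

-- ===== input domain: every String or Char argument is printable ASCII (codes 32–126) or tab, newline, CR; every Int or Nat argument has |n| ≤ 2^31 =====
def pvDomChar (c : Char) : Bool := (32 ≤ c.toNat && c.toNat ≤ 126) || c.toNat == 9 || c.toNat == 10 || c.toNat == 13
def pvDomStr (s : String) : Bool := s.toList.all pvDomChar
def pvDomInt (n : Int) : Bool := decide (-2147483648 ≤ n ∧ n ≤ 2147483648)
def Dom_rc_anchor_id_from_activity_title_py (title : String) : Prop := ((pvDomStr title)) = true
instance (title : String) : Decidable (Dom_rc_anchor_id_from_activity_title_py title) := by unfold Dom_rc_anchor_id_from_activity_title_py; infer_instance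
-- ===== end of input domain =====

-- B replaces A's split()/'-'.join plus the `while "--" in s` fixed-point loop by one
-- left-to-right pass with an in-separator flag; same return value (no side effects).

-- ===== PORT A =====
-- A-side helpers: Python's s.replace("--", "-") as a structural recursion; the lemmas
-- below justify termination of the `while "--" in s` loop (cited in decreasing_by).
def pvRep2 : List Char → List Char
  | '-' :: '-' :: t => '-' :: pvRep2 t
  | c :: t => c :: pvRep2 t
  | [] => []
theorem pvRep2_nil : pvRep2 [] = [] := rfl
theorem pvRep2_dd (t : List Char) : pvRep2 ('-' :: '-' :: t) = '-' :: pvRep2 t := rfl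
theorem pvRep2_single (a : Char) : pvRep2 [a] = [a] := by
  rw [pvRep2.eq_def]; split <;> simp_all [pvRep2_nil]
theorem pvRep2_cons (a b : Char) (t : List Char) (h : ¬ (a = '-' ∧ b = '-')) :
    pvRep2 (a :: b :: t) = a :: pvRep2 (b :: t) := by
  rw [pvRep2.eq_def]; split <;> simp_all

theorem pvRep2_cons' (c : Char) (t : List Char)
    (h : ∀ t1, c = '-' → t = '-' :: t1 → False) : pvRep2 (c :: t) = c :: pvRep2 t := by
  match t with
  | [] => exact pvRep2_single c
  | b :: t' =>
    apply pvRep2_cons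
    rintro ⟨rfl, rfl⟩
    exact h t' rfl rfl

theorem pvReplaceGo_eq (fuel : Nat) : ∀ (l acc : List Char), l.length ≤ fuel →
    PySem.Chars.replace.go ['-', '-'] ['-'] fuel l acc = acc.reverse ++ pvRep2 l := by
  induction fuel with
  | zero =>
    intro l acc h
    have : l = [] := by cases l <;> simp at h ⊢
    subst this
    rw [PySem.Chars.replace.go]
    simp [pvRep2_nil]
  | succ fuel ih =>
    intro l acc h
    match l with
    | [] =>
      rw [PySem.Chars.replace.go]
      simp [pvRep2_nil]
      omega
    | a :: [] =>
      rw [PySem.Chars.replace.go]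
      have hp : (['-', '-'].isPrefixOf [a]) = false := by simp [List.isPrefixOf]
      rw [hp]
      simp only [Bool.false_eq_true, if_false]
      rw [ih [] (a :: acc) (by simp)]
      simp [pvRep2_single, pvRep2_nil]
    | a :: b :: t =>
      rw [PySem.Chars.replace.go]
      by_cases hab : a = '-' ∧ b = '-'
      · obtain ⟨ha, hb⟩ := hab; subst ha; subst hb
        have hp : (['-', '-'].isPrefixOf ('-' :: '-' :: t)) = true := by
          simp [List.isPrefixOf]
        rw [hp]
        have ht : t.length ≤ fuel := by simp at h; omega
        rw [show List.drop ['-','-'].length ('-' :: '-' :: t) = t from rfl]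
        rw [ih t (['-'].reverse ++ acc) ht]
        simp [pvRep2_dd]
      · have hp : (['-', '-'].isPrefixOf (a :: b :: t)) = false := by
          rw [Bool.eq_false_iff]
          intro hc
          rw [List.isPrefixOf_iff_prefix, List.cons_prefix_cons, List.cons_prefix_cons] at hc
          exact hab ⟨hc.1.symm, hc.2.1.symm⟩
        rw [hp]
        simp only [Bool.false_eq_true, if_false]
        rw [ih (b :: t) (a :: acc) (by simp at h ⊢; omega)]
        rw [pvRep2_cons a b t hab]
        simp

theorem pvReplace_dd (l : List Char) : PySem.Chars.replace l ['-', '-'] ['-'] = pvRep2 l := by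
  rw [PySem.Chars.replace]
  simp only [List.isEmpty_cons, Bool.false_eq_true, if_false]
  rw [pvReplaceGo_eq l.length l [] le_rfl]
  simp

theorem pvRep2_length_le (l : List Char) : (pvRep2 l).length ≤ l.length := by
  induction l using pvRep2.induct with
  | case1 t ih => simp [pvRep2_dd]; omega
  | case2 c t h ih => rw [pvRep2_cons' c t h]; simp; omega
  | case3 => simp [pvRep2_nil]

theorem pvRep2_length_lt (l : List Char) (h : ['-', '-'] <:+: l) :
    (pvRep2 l).length < l.length := by
  induction l using pvRep2.induct with
  | case1 t ih =>
    rw [pvRep2_dd]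
    have := pvRep2_length_le t
    simp; omega
  | case2 c t hg ih =>
    rw [pvRep2_cons' c t hg]
    have hnp : ¬ ['-', '-'] <+: (c :: t) := by
      intro hc
      rw [List.cons_prefix_cons] at hc
      obtain ⟨h1, h2⟩ := hc
      obtain ⟨t1, rfl⟩ : ∃ t1, t = '-' :: t1 := by
        rcases h2 with ⟨r, hr⟩; exact ⟨r, hr.symm⟩
      exact hg t1 h1.symm rfl
    have ht : ['-', '-'] <:+: t := by
      rcases (List.infix_cons_iff.mp h) with h' | h'
      · exact absurd h' hnp
      · exact h'
    have := ih ht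
    simp; omega
  | case3 => simp at h

theorem pvReplace_dd_len (s : String) (h : PySem.Str.isIn "--" s = true) :
    (PySem.Str.replace s "--" "-").toList.length < s.toList.length := by
  rw [PySem.Str.toList_replace]
  rw [show ("--" : String).toList = ['-', '-'] from rfl, show ("-" : String).toList = ['-'] from rfl]
  rw [pvReplace_dd]
  apply pvRep2_length_lt
  rw [PySem.Str.isIn] at h
  rw [PySem.Chars.isIn_iff_infix] at h
  exact h

-- the `while "--" in s: s = s.replace("--", "-")` loop of A
def pvAWhile (s : String) : String :=
  if PySem.Str.isIn "--" s then pvAWhile (PySem.Str.replace s "--" "-") else s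
termination_by s.toList.length
decreasing_by exact pvReplace_dd_len s (by assumption)

-- port of A (`title or ""` equals `title` for a str argument; "".join over the
-- collected characters is String.ofList)
def rc_anchor_id_from_activity_title_py (title : String) : String :=
  let s := PySem.Str.replace (PySem.Str.lower title) "&" " and "
  let out := s.toList.foldl (fun acc ch =>
    if PySem.Chars.isalnum ch || (ch == ' ' || ch == '-') then acc ++ [ch] else acc) []
  let s2 := PySem.Str.strip (String.ofList out)
  let s3 := PySem.Str.join "-" ((PySem.Str.split₀ s2).filter (fun p => !(p == "")))
  pvAWhile s3

-- ===== PORT B =====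
def pvSepB (c : Char) : Bool := c == ' ' || c == '-'

-- B's flag loop over the characters (exact hand port of the for-loop in Source B)
def pvCol (sep : Char → Bool) : List Char → Bool → List Char
  | [], _ => []
  | c :: t, b =>
      if sep c then (if b then pvCol sep t true else '-' :: pvCol sep t true)
      else c :: pvCol sep t false

def rc_anchor_id_from_activity_title_py_alt (title : String) : String :=
  let s := PySem.Str.replace (PySem.Str.lower title) "&" " and "
  let kept := String.ofList (s.toList.filter
    (fun ch => PySem.Chars.isalnum ch || (ch == ' ' || ch == '-')))
  let kept2 := PySem.Str.strip kept
  String.ofList (pvCol pvSepB kept2.toList false)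

-- ===== PRECONDITION & SPEC =====
def Spec_rc_anchor_id_from_activity_title_py (title : String) (out : String) : Prop := out = rc_anchor_id_from_activity_title_py_alt title
instance (title : String) (out : String) : Decidable (Spec_rc_anchor_id_from_activity_title_py title out) := by unfold Spec_rc_anchor_id_from_activity_title_py; infer_instance

-- ===== CLAIM (what is proved, stated in full; the proofs are below) =====
def Claim_equal_rc_anchor_id_from_activity_title_py : Prop := ∀ (title : String), Dom_rc_anchor_id_from_activity_title_py title → Spec_rc_anchor_id_from_activity_title_py title (rc_anchor_id_from_activity_title_py title)

-- ===== LEMMAS AND PROOFS =====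

def pvSepD (c : Char) : Bool := c == '-'

-- flag state after processing a chunk
def pvEndF (sep : Char → Bool) (x : List Char) (b : Bool) : Bool :=
  x.foldl (fun _ c => sep c) b

theorem pvAlnumNotSpace (c : Char) (h : PySem.Chars.isalnum c = true) :
    PySem.Chars.isspace c = false := by
  have e1 : ('A').val.toNat = 65 := by decide
  have e2 : ('Z').val.toNat = 90 := by decide
  have e3 : ('a').val.toNat = 97 := by decide
  have e4 : ('z').val.toNat = 122 := by decide
  have e5 : ('0').val.toNat = 48 := by decide
  have e6 : ('9').val.toNat = 57 := by decide
  simp only [PySem.Chars.isalnum, PySem.Chars.isalpha, PySem.Chars.isupper, PySem.Chars.islower,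
    PySem.Chars.isdigit, PySem.Chars.isspace, Bool.or_eq_true, Bool.and_eq_true, decide_eq_true_eq,
    Char.le_def, UInt32.le_iff_toNat_le, Bool.or_eq_false_iff, Bool.and_eq_false_iff,
    decide_eq_false_iff_not, not_le, Char.toNat, e1, e2, e3, e4, e5, e6] at *
  omega

theorem pvColApp (sep : Char → Bool) (x : List Char) : ∀ (y : List Char) (b : Bool),
    pvCol sep (x ++ y) b = pvCol sep x b ++ pvCol sep y (pvEndF sep x b) := by
  induction x with
  | nil => intro y b; simp [pvCol, pvEndF]
  | cons c t ih =>
    intro y b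
    simp only [List.cons_append]
    rw [pvCol, pvCol]
    have he : pvEndF sep (c :: t) b = pvEndF sep t (sep c) := rfl
    rw [he]
    by_cases hs : sep c = true
    · simp only [hs, if_true]
      by_cases hb : b <;> simp [hb, ih]
    · simp only [Bool.not_eq_true] at hs
      simp [hs, ih]

theorem pvColDropTrue (sep : Char → Bool) (t : List Char) :
    pvCol sep t true = pvCol sep (t.dropWhile sep) false := by
  induction t with
  | nil => simp [pvCol]
  | cons c t ih =>
    rw [pvCol]
    by_cases hs : sep c = true
    · simp [hs, ih]
    · simp only [Bool.not_eq_true] at hs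
      rw [List.dropWhile_cons_of_neg (by simp [hs]), pvCol, hs]
      simp

theorem pvColAllSepTrue (sep : Char → Bool) (g : List Char) (h : ∀ c ∈ g, sep c = true) :
    pvCol sep g true = [] := by
  induction g with
  | nil => rfl
  | cons c t ih =>
    rw [pvCol]
    simp [h c (by simp), ih (fun c hc => h c (by simp [hc]))]

theorem pvColAllSep (sep : Char → Bool) (g : List Char) (b : Bool) (hne : g ≠ [])
    (h : ∀ c ∈ g, sep c = true) : pvCol sep g b = if b then [] else ['-'] := by
  match g with
  | c :: t =>
    rw [pvCol]
    have ht := pvColAllSepTrue sep t (fun c hc => h c (by simp [hc]))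
    simp [h c (by simp), ht]

theorem pvEndFAllSep (sep : Char → Bool) : ∀ (g : List Char) (b : Bool), g ≠ [] →
    (∀ c ∈ g, sep c = true) → pvEndF sep g b = true := by
  intro g
  induction g with
  | nil => intro b hne _; exact absurd rfl hne
  | cons c t ih =>
    intro b _ h
    show pvEndF sep t (sep c) = true
    by_cases ht : t = []
    · subst ht; simpa [pvEndF] using h c (by simp)
    · exact ih (sep c) ht (fun c hc => h c (by simp [hc]))

theorem pvColCongr (sep sep' : Char → Bool) (w : List Char) : ∀ (b : Bool),
    (∀ c ∈ w, sep c = sep' c) → pvCol sep w b = pvCol sep' w b := by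
  induction w with
  | nil => intro b _; rfl
  | cons c t ih =>
    intro b h
    rw [pvCol, pvCol, ← h c (by simp)]
    have iht : ∀ b', pvCol sep t b' = pvCol sep' t b' :=
      fun b' => ih b' (fun c hc => h c (by simp [hc]))
    by_cases hs : sep' c = true <;> by_cases hb : b <;> simp_all [iht]


theorem pvEndFCongr (sep sep' : Char → Bool) (w : List Char) (b : Bool)
    (h : ∀ c ∈ w, sep c = sep' c) : pvEndF sep w b = pvEndF sep' w b := by
  induction w generalizing b with
  | nil => rfl
  | cons c t ih =>
    show pvEndF sep t (sep c) = pvEndF sep' t (sep' c)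
    rw [h c (by simp)]
    exact ih (sep' c) (fun c hc => h c (by simp [hc]))

theorem pvSepDB (c : Char) (h : c ≠ ' ') : pvSepD c = pvSepB c := by
  simp [pvSepD, pvSepB, h]

def pvWords (l : List Char) : List (List Char) :=
  match l with
  | [] => []
  | c :: t =>
      if PySem.Chars.isspace c then pvWords t
      else (c :: t.takeWhile (fun x => !PySem.Chars.isspace x)) ::
           pvWords (t.dropWhile (fun x => !PySem.Chars.isspace x))
termination_by l.length
decreasing_by
  · simp
  · simpa using Nat.lt_succ_of_le (List.length_dropWhile_le _ _)

theorem pvWords_nil : pvWords [] = [] := by rw [pvWords]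
theorem pvWords_space (c : Char) (t : List Char) (h : PySem.Chars.isspace c = true) :
    pvWords (c :: t) = pvWords t := by rw [pvWords]; simp [h]
theorem pvWords_nonspace (c : Char) (t : List Char) (h : PySem.Chars.isspace c = false) :
    pvWords (c :: t) = (c :: t.takeWhile (fun x => !PySem.Chars.isspace x)) ::
      pvWords (t.dropWhile (fun x => !PySem.Chars.isspace x)) := by
  rw [pvWords]; simp [h]

theorem pvSplit0Go_eq (l : List Char) : ∀ (cur : List Char) (acc : List (List Char)),
    PySem.Chars.split₀.go l cur acc = acc.reverse ++
      (match cur with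
       | [] => pvWords l
       | _ => (cur.reverse ++ l.takeWhile (fun x => !PySem.Chars.isspace x)) ::
              pvWords (l.dropWhile (fun x => !PySem.Chars.isspace x))) := by
  induction l with
  | nil =>
    intro cur acc
    rw [PySem.Chars.split₀.go]
    match cur with
    | [] => simp [pvWords_nil]
    | x :: xs => simp [pvWords_nil]
  | cons c t ih =>
    intro cur acc
    rw [PySem.Chars.split₀.go]
    by_cases hs : PySem.Chars.isspace c = true
    · simp only [hs, if_true]
      match cur with
      | [] =>
        simp only [List.isEmpty_nil, if_true]
        rw [ih [] acc]
        simp [pvWords_space c t hs]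
      | x :: xs =>
        simp only [List.isEmpty_cons, Bool.false_eq_true, if_false]
        rw [ih [] ((x :: xs).reverse :: acc)]
        simp only [List.takeWhile_cons, List.dropWhile_cons, hs]
        simp [pvWords_space c t hs]
    · simp only [Bool.not_eq_true] at hs
      simp only [hs, Bool.false_eq_true, if_false]
      rw [ih (c :: cur) acc]
      match cur with
      | [] =>
        simp [List.takeWhile_cons, List.dropWhile_cons, hs, pvWords_nonspace c t hs]
      | x :: xs =>
        simp [List.takeWhile_cons, List.dropWhile_cons, hs]

theorem pvSplit0_eq (l : List Char) : PySem.Chars.split₀ l = pvWords l := by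
  rw [PySem.Chars.split₀, pvSplit0Go_eq l [] []]
  simp

theorem pvWordsNeNil (l : List Char) : ∀ w ∈ pvWords l, w ≠ [] := by
  induction l using pvWords.induct with
  | case1 => simp [pvWords_nil]
  | case2 c t h ih => rw [pvWords_space c t h]; exact ih
  | case3 c t h ih =>
    rw [pvWords_nonspace c t (by simpa using h)]
    intro w hw
    rcases List.mem_cons.mp hw with hw | hw
    · simp [hw]
    · exact ih w hw

theorem pvWordsSkip (g : List Char) (x : List Char) (h : ∀ c ∈ g, PySem.Chars.isspace c = true) :
    pvWords (g ++ x) = pvWords x := by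
  induction g with
  | nil => simp
  | cons c t ih =>
    simp only [List.cons_append]
    rw [pvWords_space c (t ++ x) (h c (by simp))]
    exact ih (fun c hc => h c (by simp [hc]))

-- with no "--" the dash collapse is the identity
theorem pvColNoDD (s : List Char) (h : ¬ ['-', '-'] <:+: s) :
    pvCol pvSepD s false = s := by
  induction s using pvRep2.induct with
  | case1 t ih =>
    exact absurd (List.IsPrefix.isInfix ⟨t, rfl⟩) h
  | case2 c t hg ih =>
    have hnt : ¬ ['-', '-'] <:+: t := fun hc => h (List.infix_cons_iff.mpr (Or.inr hc))
    rw [pvCol]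
    by_cases hc : c = '-'
    · subst hc
      have hdw : t.dropWhile pvSepD = t := by
        match t with
        | [] => rfl
        | d :: t' =>
          have hd : d ≠ '-' := fun hd => hg t' rfl (by rw [hd])
          rw [List.dropWhile_cons_of_neg]
          simp [pvSepD, hd]
      rw [if_pos (by simp [pvSepD]), if_neg (by simp), pvColDropTrue, hdw, ih hnt]
    · rw [if_neg (by simp [pvSepD, hc]), ih hnt]
  | case3 => rfl

theorem pvColTrueCons (t : List Char) :
    pvCol pvSepD ('-' :: t) true = pvCol pvSepD t true := by
  rw [pvCol]; simp [pvSepD]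

theorem pvColRep2 (t : List Char) : ∀ (b : Bool),
    pvCol pvSepD (pvRep2 t) b = pvCol pvSepD t b := by
  induction t using pvRep2.induct with
  | case1 t ih =>
    intro b
    rw [pvRep2_dd]
    rw [show pvCol pvSepD ('-' :: '-' :: t) b =
          if b then pvCol pvSepD ('-' :: t) true else '-' :: pvCol pvSepD ('-' :: t) true by
        rw [pvCol]; simp [pvSepD]]
    rw [show pvCol pvSepD ('-' :: pvRep2 t) b =
          if b then pvCol pvSepD (pvRep2 t) true else '-' :: pvCol pvSepD (pvRep2 t) true by
        rw [pvCol]; simp [pvSepD]]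
    rw [ih true, pvColTrueCons t]
  | case2 c t hg ih =>
    intro b
    rw [pvRep2_cons' c t hg, pvCol, pvCol]
    by_cases hs : pvSepD c = true <;> by_cases hb : b <;> simp [hs, hb, ih]
  | case3 => intro b; rfl

theorem pvLoop (n : Nat) : ∀ (s : String), s.toList.length ≤ n →
    pvAWhile s = String.ofList (pvCol pvSepD s.toList false) := by
  induction n with
  | zero =>
    intro s hlen
    have hnil : s.toList = [] := by
      cases hl : s.toList with
      | nil => rfl
      | cons a t => rw [hl] at hlen; simp at hlen
    have hs : s = "" := by
      have := congrArg String.ofList hnil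
      rwa [String.ofList_toList] at this
    subst hs
    rw [pvAWhile]
    simp only [show PySem.Str.isIn "--" "" = false from rfl]
    rfl
  | succ n ih =>
    intro s hlen
    rw [pvAWhile]
    by_cases h : PySem.Str.isIn "--" s = true
    · simp only [h, if_true]
      have hlt := pvReplace_dd_len s h
      rw [ih (PySem.Str.replace s "--" "-") (by omega)]
      rw [PySem.Str.toList_replace,
        show ("--" : String).toList = ['-', '-'] from rfl,
        show ("-" : String).toList = ['-'] from rfl,
        pvReplace_dd, pvColRep2]
    · simp only [Bool.not_eq_true] at h
      simp only [h, Bool.false_eq_true, if_false]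
      rw [pvColNoDD s.toList ((PySem.Chars.isIn_eq_false_iff _ _).mp (by rwa [PySem.Str.isIn] at h)),
        String.ofList_toList]

theorem pvDropWhileHead (p : Char → Bool) (x : List Char) :
    ∀ c, (x.dropWhile p).head? = some c → p c = false := by
  induction x with
  | nil => intro c h; simp at h
  | cons a t ih =>
    intro c h
    by_cases hp : p a = true
    · rw [List.dropWhile_cons_of_pos hp] at h; exact ih c h
    · rw [List.dropWhile_cons_of_neg hp] at h
      simp at h
      subst h
      simpa using hp

-- the algebra of one word + one separator gap, with the tail already handled
theorem pvStep (w g r' J' : List Char) (b : Bool)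
    (hsepw : ∀ c ∈ w, pvSepD c = pvSepB c)
    (hgne : g ≠ []) (hgB : ∀ c ∈ g, pvSepB c = true)
    (hih : pvCol pvSepD J' true = pvCol pvSepB r' true) :
    pvCol pvSepD (w ++ '-' :: J') b = pvCol pvSepB (w ++ (g ++ r')) b := by
  rw [pvColApp, pvColApp, pvColApp]
  rw [pvColAllSep pvSepB g _ hgne hgB, pvEndFAllSep pvSepB g _ hgne hgB]
  rw [pvEndFCongr pvSepD pvSepB w b hsepw, pvColCongr pvSepD pvSepB w b hsepw]
  rw [show pvCol pvSepD ('-' :: J') (pvEndF pvSepB w b) =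
      if pvEndF pvSepB w b then pvCol pvSepD J' true else '-' :: pvCol pvSepD J' true from by
    rw [pvCol]; simp [pvSepD]]
  rw [hih]
  by_cases he : pvEndF pvSepB w b = true <;> simp [he]

-- the heart of the proof: dash-collapsing the "-".join of the words of u equals the
-- one-pass mixed collapse of u, for u with only ' ' whitespace and no outer whitespace
theorem pvMain (n : Nat) : ∀ (u : List Char) (b : Bool), u.length ≤ n →
    (∀ c ∈ u, PySem.Chars.isspace c = true → c = ' ') →
    (∀ c, u.head? = some c → PySem.Chars.isspace c = false) →
    (∀ c, u.getLast? = some c → PySem.Chars.isspace c = false) →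
    pvCol pvSepD (PySem.Chars.join ['-'] (pvWords u)) b = pvCol pvSepB u b := by
  induction n with
  | zero =>
    intro u b hlen _ _ _
    have hnil : u = [] := by
      cases u with
      | nil => rfl
      | cons a t => simp at hlen
    subst hnil
    rw [pvWords_nil, PySem.Chars.join_nil]
    rfl
  | succ n ih =>
    intro u b hlen honly hhead hlast
    match u with
    | [] => rw [pvWords_nil, PySem.Chars.join_nil]; rfl
    | c0 :: t =>
      have hc0 : PySem.Chars.isspace c0 = false := hhead c0 rfl
      have hspne : ∀ (c : Char), PySem.Chars.isspace c = false → c ≠ ' ' := by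
        intro c hsp he; subst he; exact absurd hsp (by decide)
      have hsepw : ∀ c ∈ c0 :: t.takeWhile (fun x => !PySem.Chars.isspace x),
          pvSepD c = pvSepB c := by
        intro c hc
        rcases List.mem_cons.mp hc with hc | hc
        · subst hc; exact pvSepDB _ (hspne _ hc0)
        · exact pvSepDB c (hspne c (by simpa using List.mem_takeWhile_imp hc))
      cases hr : t.dropWhile (fun x => !PySem.Chars.isspace x) with
      | nil =>
        have ht : t = t.takeWhile (fun x => !PySem.Chars.isspace x) := by
          conv_lhs => rw [← List.takeWhile_append_dropWhile
            (p := fun x => !PySem.Chars.isspace x) (l := t)]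
          rw [hr, List.append_nil]
        rw [pvWords_nonspace c0 t hc0, hr, pvWords_nil, PySem.Chars.join_singleton, ← ht]
        exact pvColCongr pvSepD pvSepB (c0 :: t) b (fun c hc => hsepw c (by rwa [← ht]))
      | cons d rt =>
        have ht : t = t.takeWhile (fun x => !PySem.Chars.isspace x) ++ (d :: rt) := by
          conv_lhs => rw [← List.takeWhile_append_dropWhile
            (p := fun x => !PySem.Chars.isspace x) (l := t)]
          rw [hr]
        have hds : PySem.Chars.isspace d = true := by
          have := pvDropWhileHead (fun x => !PySem.Chars.isspace x) t d (by rw [hr]; rfl)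
          simpa using this
        have hgsp : ∀ c ∈ (d :: rt).takeWhile PySem.Chars.isspace,
            PySem.Chars.isspace c = true := fun c hc => List.mem_takeWhile_imp hc
        have hmemu : ∀ c ∈ d :: rt, c ∈ c0 :: t := by
          intro c hc
          rw [ht]
          exact List.mem_cons_of_mem c0 (List.mem_append_right _ hc)
        cases hr2 : (d :: rt).dropWhile PySem.Chars.isspace with
        | nil =>
          exfalso
          have hall : ∀ c ∈ d :: rt, PySem.Chars.isspace c = true := by
            have := List.dropWhile_eq_nil_iff.mp hr2
            simpa using this
          have hz : (d :: rt).getLast? = some ((d :: rt).getLast (by simp)) :=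
            List.getLast?_eq_some_getLast (by simp)
          have hzu : (c0 :: t).getLast? = some ((d :: rt).getLast (by simp)) := by
            rw [show c0 :: t = (c0 :: t.takeWhile (fun x => !PySem.Chars.isspace x)) ++ (d :: rt)
                from by rw [List.cons_append, ← ht]]
            rw [List.getLast?_append, hz]
            rfl
          have := hlast _ hzu
          rw [hall _ (List.getLast_mem _)] at this
          simp at this
        | cons e rt' =>
          have hgr : d :: rt = (d :: rt).takeWhile PySem.Chars.isspace ++ (e :: rt') := by
            conv_lhs => rw [← List.takeWhile_append_dropWhile
              (p := PySem.Chars.isspace) (l := d :: rt)]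
            rw [hr2]
          have hgne : (d :: rt).takeWhile PySem.Chars.isspace ≠ [] := by
            rw [List.takeWhile_cons_of_pos hds]
            simp
          have hee : PySem.Chars.isspace e = false :=
            pvDropWhileHead PySem.Chars.isspace (d :: rt) e (by rw [hr2]; rfl)
          have hdec : c0 :: t = (c0 :: t.takeWhile (fun x => !PySem.Chars.isspace x)) ++
              ((d :: rt).takeWhile PySem.Chars.isspace ++ (e :: rt')) := by
            rw [List.cons_append, ← hgr, ← ht]
          have hgB : ∀ c ∈ (d :: rt).takeWhile PySem.Chars.isspace, pvSepB c = true := by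
            intro c hc
            have hmem := hmemu c ((List.takeWhile_sublist _).mem hc)
            have := honly c hmem (hgsp c hc)
            subst this
            rfl
          have hr'mem : ∀ c ∈ e :: rt', c ∈ c0 :: t := by
            intro c hc
            exact hmemu c (hgr ▸ List.mem_append_right _ hc)
          have hihr : pvCol pvSepD (PySem.Chars.join ['-'] (pvWords (e :: rt'))) true =
              pvCol pvSepB (e :: rt') true := by
            apply ih (e :: rt') true
            · have hlen2 := congrArg List.length hdec
              have hggt : 1 ≤ ((d :: rt).takeWhile PySem.Chars.isspace).length := by
                cases hg : (d :: rt).takeWhile PySem.Chars.isspace with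
                | nil => exact absurd hg hgne
                | cons _ _ => simp
              simp only [List.length_cons, List.length_append] at hlen2 hlen ⊢
              omega
            · intro c hc hsp
              exact honly c (hr'mem c hc) hsp
            · intro c hc
              simp only [List.head?_cons, Option.some.injEq] at hc
              subst hc
              exact hee
            · intro c hc
              apply hlast c
              rw [hdec, List.getLast?_append, List.getLast?_append, hc]
              rfl
          have hwords2 : pvWords (d :: rt) = pvWords (e :: rt') := by
            rw [hgr]
            exact pvWordsSkip _ _ hgsp
          rw [pvWords_nonspace c0 t hc0, hr, hwords2]
          rw [pvWords_nonspace e rt' hee] at hihr ⊢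
          rw [PySem.Chars.join_cons_cons]
          rw [List.append_assoc, List.singleton_append]
          conv_rhs => rw [hdec]
          exact pvStep _ _ _ _ b hsepw hgne hgB hihr

theorem pvStripHead (x : List Char) :
    ∀ c, (PySem.Chars.strip x).head? = some c → PySem.Chars.isspace c = false := by
  intro c h
  rw [PySem.Chars.strip, PySem.Chars.rstrip, PySem.Chars.lstrip] at h
  have hpre : ((List.dropWhile PySem.Chars.isspace
      (List.dropWhile PySem.Chars.isspace x).reverse).reverse) <+:
      (List.dropWhile PySem.Chars.isspace x) := by
    have hsuf := List.dropWhile_suffix (l := (List.dropWhile PySem.Chars.isspace x).reverse)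
      (p := PySem.Chars.isspace)
    have := List.reverse_prefix.mpr hsuf
    rwa [List.reverse_reverse] at this
  obtain ⟨r, hr⟩ := hpre
  have hz : (List.dropWhile PySem.Chars.isspace x).head? = some c := by
    rw [← hr, List.head?_append, h]
    rfl
  exact pvDropWhileHead _ _ c hz

theorem pvStripLast (x : List Char) :
    ∀ c, (PySem.Chars.strip x).getLast? = some c → PySem.Chars.isspace c = false := by
  intro c h
  rw [PySem.Chars.strip, PySem.Chars.rstrip, List.getLast?_reverse] at h
  exact pvDropWhileHead _ _ c h

theorem pvStripSubset (x : List Char) : ∀ c ∈ PySem.Chars.strip x, c ∈ x := by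
  intro c hc
  rw [PySem.Chars.strip, PySem.Chars.rstrip, PySem.Chars.lstrip, List.mem_reverse] at hc
  have h1 := (List.dropWhile_sublist (l := (List.dropWhile PySem.Chars.isspace x).reverse)
    (PySem.Chars.isspace)).mem hc
  rw [List.mem_reverse] at h1
  exact (List.dropWhile_sublist (l := x) (PySem.Chars.isspace)).mem h1

-- ===== VERDICT (by name: the statement is the Claim_ definition above) =====
theorem pvFoldFilter (l : List Char) :
    l.foldl (fun acc ch =>
      if PySem.Chars.isalnum ch || (ch == ' ' || ch == '-') then acc ++ [ch] else acc) [] =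
    l.filter (fun ch => PySem.Chars.isalnum ch || (ch == ' ' || ch == '-')) := by
  simpa using PySem.List.foldl_append_if
    (fun ch => PySem.Chars.isalnum ch || (ch == ' ' || ch == '-')) id l []

theorem rc_anchor_id_from_activity_title_py_spec : Claim_equal_rc_anchor_id_from_activity_title_py := by
  intro title _
  unfold Spec_rc_anchor_id_from_activity_title_py
  unfold rc_anchor_id_from_activity_title_py rc_anchor_id_from_activity_title_py_alt
  dsimp only
  rw [pvFoldFilter]
  set x := (PySem.Str.replace (PySem.Str.lower title) "&" " and ").toList.filter
    (fun ch => PySem.Chars.isalnum ch || (ch == ' ' || ch == '-')) with hx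
  set s2 := PySem.Str.strip (String.ofList x) with hs2
  have hu : s2.toList = PySem.Chars.strip x := by
    rw [hs2, PySem.Str.toList_strip, String.toList_ofList]
  have hfilter : (PySem.Str.split₀ s2).filter (fun p => !(p == "")) = PySem.Str.split₀ s2 := by
    apply List.filter_eq_self.mpr
    intro p hp
    have hmem : p.toList ∈ List.map String.toList (PySem.Str.split₀ s2) :=
      List.mem_map_of_mem hp
    rw [PySem.Str.split₀_map_toList, pvSplit0_eq] at hmem
    have hne := pvWordsNeNil _ _ hmem
    simp only [Bool.not_eq_eq_eq_not, Bool.not_true, beq_eq_false_iff_ne, ne_eq]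
    intro hcontra
    exact hne (by rw [hcontra]; rfl)
  rw [hfilter]
  rw [pvLoop (PySem.Str.join "-" (PySem.Str.split₀ s2)).toList.length _ le_rfl]
  have hjl : (PySem.Str.join "-" (PySem.Str.split₀ s2)).toList =
      PySem.Chars.join ['-'] (pvWords (PySem.Chars.strip x)) := by
    rw [PySem.Str.toList_join, PySem.Str.split₀_map_toList, pvSplit0_eq, hu]
    rfl
  rw [hjl, hu]
  apply congrArg String.ofList
  apply pvMain (PySem.Chars.strip x).length _ false le_rfl
  · intro c hc hsp
    have hcx := pvStripSubset x c hc
    have hP := (List.mem_filter.mp hcx).2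
    simp only [Bool.or_eq_true, beq_iff_eq] at hP
    rcases hP with hP | hP | hP
    · rw [pvAlnumNotSpace c hP] at hsp
      simp at hsp
    · exact hP
    · subst hP
      exact absurd hsp (by decide)
  · exact pvStripHead x
  · exact pvStripLast x
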